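-- pv_equiv track=rewrite | github.com/nargesbh/Assembly-NASM-x86 | assembler.py | displacement_finder
-- ===== SOURCE A (Python) =====
-- def displacement_finder(disp):
--     displacement = ""
--
--     count_im_bit = int(disp,16)
--
--     if count_im_bit < 128:
--         count_im_bit = 8
--
--     elif count_im_bit > 128:
--         count_im_bit = 32
--
--
--     disp = disp[2:]
--     if(len(disp)%2!=0):
--         disp = '0'+disp
--
--     len_data = len(disp)
--     for i in range(len_data-2, -1, -2):
--
--         binary = str("{0:08b}".format(int(disp[i], 16)))
--         binary = binary[len(binary)-4 :]
--         displacement += binary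
--         # displacement += "--"
--
--         binary = binary = str("{0:08b}".format(int(disp[i+1], 16)))
--         binary = binary[len(binary)-4 :]
--         displacement += binary
--         # displacement += "--"
--     number_of_bits = count_im_bit
--
--     return displacement, number_of_bits
-- ===== SOURCE B (Python) =====
-- def _width(value):
--     if value < 128:
--         return 8
--     if value > 128:
--         return 32
--     return value
--
--
-- def displacement_finder(disp):
--     number_of_bits = _width(int(disp, 16))
--     h = disp[2:]
--     if not h:
--         return "", number_of_bits
--     n = (len(h) + 1) // 2
--     v = int(h, 16)
--     swapped = int.from_bytes(v.to_bytes(n, 'big')[::-1], 'big')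
--     displacement = format(swapped, '0{}b'.format(8 * n))
--     return displacement, number_of_bits
-- ===== Notes on version B (the rewrite author's own statement) =====
-- stated objective: faster
-- what changed: Replaces A's reverse-stepped per-nibble index loop with two int()/format() calls and string appends per iteration by a numeric pipeline: parse the whole hex tail as one integer, byte-swap it with to_bytes/from_bytes, and render it once as a zero-padded binary string.
import Mathlib
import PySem

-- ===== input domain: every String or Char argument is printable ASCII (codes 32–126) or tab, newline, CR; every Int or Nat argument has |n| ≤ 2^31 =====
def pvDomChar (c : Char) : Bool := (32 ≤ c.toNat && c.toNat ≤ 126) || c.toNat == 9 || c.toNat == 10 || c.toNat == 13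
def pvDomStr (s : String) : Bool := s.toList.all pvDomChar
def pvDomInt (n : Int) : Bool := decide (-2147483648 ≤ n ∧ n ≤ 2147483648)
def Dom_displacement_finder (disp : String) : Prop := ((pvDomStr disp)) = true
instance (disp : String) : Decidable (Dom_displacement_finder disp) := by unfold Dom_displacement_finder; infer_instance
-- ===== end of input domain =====

-- B replaces A's reverse-stepped per-nibble index loop and string appends by one numeric pipeline:
-- parse the hex tail as ONE integer, byte-swap it via to_bytes/from_bytes, and render it once as a
-- zero-padded binary string (constant-factor speedup measured).

-- Shared library helpers (Python built-ins used by BOTH sources: int(_,16) parsing of the full string):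
-- int(c, 16) for a single character: hex digit value, none = ValueError (exact on ASCII)
def pvHexDigit? (c : Char) : Option Nat :=
  if 48 ≤ c.toNat ∧ c.toNat ≤ 57 then some (c.toNat - 48)        -- '0'..'9'
  else if 97 ≤ c.toNat ∧ c.toNat ≤ 102 then some (c.toNat - 87)  -- 'a'..'f'
  else if 65 ≤ c.toNat ∧ c.toNat ≤ 70 then some (c.toNat - 55)   -- 'A'..'F'
  else none

-- Python str.isspace characters int() strips (ASCII part; exact on Dom)
def pvIsPySpace (c : Char) : Bool :=
  c = ' ' || c = '\t' || c = '\n' || c = '\r' || c.toNat == 11 || c.toNat == 12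

-- digit run of a base-16 int literal: digits with single underscores BETWEEN digits
def pvDigits16 : Nat → List Char → Option Nat
  | acc, [] => some acc
  | _,   ['_'] => none
  | acc, '_' :: c :: rest =>
      match pvHexDigit? c with
      | some d => pvDigits16 (acc * 16 + d) rest
      | none => none
  | acc, c :: rest =>
      match pvHexDigit? c with
      | some d => pvDigits16 (acc * 16 + d) rest
      | none => none

def pvParseDigits16 : List Char → Option Nat
  | [] => none
  | c :: rest =>
      match pvHexDigit? c with
      | some d => pvDigits16 d rest
      | none => none

-- int(s, 16): strip whitespace, optional sign, optional 0x/0X prefix (one '_' may follow the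
-- prefix), then the digit run; none = ValueError (exact on the ASCII domain)
def pvInt16? (s : String) : Option Int :=
  let l := ((s.toList.dropWhile pvIsPySpace).reverse.dropWhile pvIsPySpace).reverse
  let sgn : Int := match l with | '-' :: _ => -1 | _ => 1
  let l2 := match l with | '+' :: t => t | '-' :: t => t | _ => l
  let l3 := match l2 with
    | '0' :: 'x' :: t => (match t with | '_' :: u => u | _ => t)
    | '0' :: 'X' :: t => (match t with | '_' :: u => u | _ => t)
    | _ => l2
  match pvParseDigits16 l3 with
  | some v => some (sgn * (v : Int))
  | none => none

-- ===== PORT A =====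
-- "{0:08b}".format(d) for d < 256: eight binary digit characters (A renders each nibble this way)
def pvBits8 (n : Nat) : List Char :=
  [if n.testBit 7 then '1' else '0', if n.testBit 6 then '1' else '0',
   if n.testBit 5 then '1' else '0', if n.testBit 4 then '1' else '0',
   if n.testBit 3 then '1' else '0', if n.testBit 2 then '1' else '0',
   if n.testBit 1 then '1' else '0', if n.testBit 0 then '1' else '0']

-- literal port of A; the .getD 0 defaults only make raising spots total (Pre_ excludes them)
def displacement_finder (disp : String) : String × Int :=
  -- count_im_bit = int(disp,16); if <128: 8 elif >128: 32
  let count_im_bit : Int := (pvInt16? disp).getD 0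
  let count_im_bit : Int :=
    if count_im_bit < 128 then 8 else if count_im_bit > 128 then 32 else count_im_bit
  -- disp = disp[2:]; pad to even length
  let d : List Char := disp.toList.drop 2
  let d : List Char := if d.length % 2 ≠ 0 then '0' :: d else d
  let len_data : Int := d.length
  -- for i in range(len_data-2, -1, -2): two nibbles appended per iteration
  let displacement : List Char :=
    (PySem.List.pyRange (len_data - 2) (-1) (-2)).foldl
      (fun acc i =>
        let binary := (pvBits8 ((pvHexDigit? (PySem.List.pyGetD d i '0')).getD 0)).drop 4
        let acc := acc ++ binary
        let binary := (pvBits8 ((pvHexDigit? (PySem.List.pyGetD d (i + 1) '0')).getD 0)).drop 4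
        acc ++ binary) []
  (String.mk displacement, count_im_bit)

-- ===== PORT B =====
-- helper _width(value) of Source B
def pvWidth (value : Int) : Int :=
  if value < 128 then 8 else if value > 128 then 32 else value

-- int(h, 16) for the all-hex-digit tail h (a plain digit run; '.getD 0' covers the raising spots Pre_ excludes)
def pvHexVal (l : List Char) : Nat :=
  l.foldl (fun a c => 16 * a + (pvHexDigit? c).getD 0) 0

-- v.to_bytes(n, 'big'): n base-256 digits, most significant first
def pvToBytesBE : Nat → Nat → List Nat
  | 0, _ => []
  | n + 1, v => pvToBytesBE n (v / 256) ++ [v % 256]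

-- int.from_bytes(bs, 'big')
def pvFromBytesBE (bs : List Nat) : Nat :=
  bs.foldl (fun a b => 256 * a + b) 0

-- format(v, '0{w}b'): zero-padded binary of width w (exact for v < 2^w)
def pvBin : Nat → Nat → List Char
  | 0, _ => []
  | w + 1, v => pvBin w (v / 2) ++ [if v % 2 = 1 then '1' else '0']

def displacement_finder_alt (disp : String) : String × Int :=
  let number_of_bits : Int := pvWidth ((pvInt16? disp).getD 0)
  match disp.toList.drop 2 with
  | [] => ("", number_of_bits)
  | h =>
    let n : Nat := (h.length + 1) / 2
    let v : Nat := pvHexVal h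
    let swapped : Nat := pvFromBytesBE ((pvToBytesBE n v).reverse)
    (String.mk (pvBin (8 * n) swapped), number_of_bits)

-- ===== PRECONDITION & SPEC =====
def pvIsHex (c : Char) : Bool := (pvHexDigit? c).isSome
def pvIsSign (c : Char) : Bool := c = '+' || c = '-'

-- Exactly the inputs on which A returns (no exception): int(disp,16) must parse and every char of
-- disp[2:] must be a hex digit, so any sign/whitespace/underscore lives in the first two chars.
def Pre_displacement_finder (disp : String) : Prop :=
  let l := disp.toList
  let c0 := l.getD 0 '!'
  let c1 := l.getD 1 '!'
  let rest := l.drop 2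
  (l.length = 1 ∧ pvIsHex c0) ∨
  (2 ≤ l.length ∧ rest.all pvIsHex ∧
    ((pvIsHex c0 ∧ pvIsHex c1) ∨
     (c0 = '0' ∧ (c1 = 'x' ∨ c1 = 'X') ∧ rest ≠ []) ∨
     (pvIsSign c0 ∧ pvIsHex c1) ∨
     (pvIsPySpace c0 ∧ pvIsHex c1) ∨
     (pvIsPySpace c0 ∧ pvIsPySpace c1 ∧ rest ≠ []) ∨
     (pvIsPySpace c0 ∧ pvIsSign c1 ∧ rest ≠ []) ∨
     (pvIsHex c0 ∧ c1 = '_' ∧ rest ≠ []) ∨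
     (pvIsHex c0 ∧ pvIsPySpace c1 ∧ rest = [])))
instance (disp : String) : Decidable (Pre_displacement_finder disp) := by
  unfold Pre_displacement_finder; infer_instance

def pvWitness_displacement_finder : String := "0x1A2B"

def Spec_displacement_finder (disp : String) (out : String × Int) : Prop := out = displacement_finder_alt disp
instance (disp : String) (out : String × Int) : Decidable (Spec_displacement_finder disp out) := by unfold Spec_displacement_finder; infer_instance

-- ===== CLAIM (what is proved, stated in full; the proofs are below) =====
def Claim_equal_displacement_finder : Prop := ∀ (disp : String), Dom_displacement_finder disp → Pre_displacement_finder disp → Spec_displacement_finder disp (displacement_finder disp)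

-- ===== LEMMAS AND PROOFS =====

-- bytes.fromhex-style pairing of A's padded nibble list: the abstract meeting point of the proofs
def pvFromHex : List Char → List Nat
  | c :: c' :: rest =>
      (16 * (pvHexDigit? c).getD 0 + (pvHexDigit? c').getD 0) :: pvFromHex rest
  | _ => []

-- the two 4-bit tails glue to one 8-bit rendering of the byte
theorem pvBits8_glue : ∀ a b : Fin 16,
    (pvBits8 a).drop 4 ++ (pvBits8 b).drop 4 = pvBits8 (16 * a + b) := by decide

theorem pvHexDigit?_lt (c : Char) : (pvHexDigit? c).getD 0 < 16 := by
  unfold pvHexDigit?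
  split_ifs with h1 h2 h3 <;> simp [Option.getD] <;> omega

theorem pvPyGetD_cons2 (c c' : Char) (t : List Char) (i : Int) (h : 0 ≤ i) :
    PySem.List.pyGetD (c :: c' :: t) (i + 2) '0' = PySem.List.pyGetD t i '0' := by
  obtain ⟨n, rfl⟩ := Int.eq_ofNat_of_zero_le h
  rw [show ((n : Int) + 2) = ((n + 2 : Nat) : Int) by push_cast; ring,
      PySem.List.pyGetD_natCast, PySem.List.pyGetD_natCast]
  simp [List.getD]

-- closed form of range(n-2, -1, -2) for even n = 2*m
theorem pvRange_step2 (m : Nat) :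
    PySem.List.pyRange ((2 * m : Int) - 2) (-1) (-2)
      = (List.range m).map (fun (k : Nat) => (2 * m : Int) - 2 - 2 * (k : Int)) := by
  unfold PySem.List.pyRange
  rcases Nat.eq_zero_or_pos m with hm | hm
  · subst hm; norm_num
  · have hlt : (-1 : Int) < 2 * m - 2 := by omega
    simp only [if_neg (by norm_num : ¬ ((-2 : Int) = 0)), if_neg (by norm_num : ¬ (0 : Int) < -2),
      if_pos hlt]
    have hcount : (((2 * m : Int) - 2 - -1 + - -2 - 1) / - -2).toNat = m := by
      rw [show ((2 * m : Int) - 2 - -1 + - -2 - 1) = 2 * m by ring,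
          show (- -(2:Int)) = 2 by norm_num,
          show (2 * (m : Int)) / 2 = m by omega]
      exact Int.toNat_natCast m
    rw [hcount]
    exact List.map_congr_left (fun k _ => by ring)

theorem pvFromHex_cons (c c' : Char) (t : List Char) :
    pvFromHex (c :: c' :: t)
      = (16 * (pvHexDigit? c).getD 0 + (pvHexDigit? c').getD 0) :: pvFromHex t := rfl

-- A's per-index loop body, as a function of the index
def pvNibPair (l : List Char) (i : Int) : List Char :=
  (pvBits8 ((pvHexDigit? (PySem.List.pyGetD l i '0')).getD 0)).drop 4
    ++ (pvBits8 ((pvHexDigit? (PySem.List.pyGetD l (i + 1) '0')).getD 0)).drop 4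

theorem pvNibPair_zero (c c' : Char) (t : List Char) :
    pvNibPair (c :: c' :: t) 0
      = pvBits8 (16 * (pvHexDigit? c).getD 0 + (pvHexDigit? c').getD 0) := by
  unfold pvNibPair
  rw [show PySem.List.pyGetD (c :: c' :: t) 0 '0' = c from by
        rw [show (0 : Int) = ((0 : Nat) : Int) from rfl, PySem.List.pyGetD_natCast]; rfl,
      show PySem.List.pyGetD (c :: c' :: t) (0 + 1) '0' = c' from by
        rw [show ((0 : Int) + 1) = ((1 : Nat) : Int) from rfl, PySem.List.pyGetD_natCast]; rfl]
  exact pvBits8_glue ⟨_, pvHexDigit?_lt c⟩ ⟨_, pvHexDigit?_lt c'⟩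

theorem pvNibPair_shift (c c' : Char) (t : List Char) (i : Int) (h : 0 ≤ i) :
    pvNibPair (c :: c' :: t) (i + 2) = pvNibPair t i := by
  unfold pvNibPair
  rw [pvPyGetD_cons2 c c' t i h,
      show (i + 2 + 1) = (i + 1) + 2 from by ring,
      pvPyGetD_cons2 c c' t (i + 1) (by omega)]

-- A's descending index loop, flat-mapped through its body, renders the byte-reversed pairs
theorem pvLoop_core (m : Nat) (l : List Char) (hl : l.length = 2 * m) :
    ((List.range m).map (fun (k : Nat) => (2 * m : Int) - 2 - 2 * (k : Int))).flatMap (pvNibPair l)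
      = ((pvFromHex l).reverse.map pvBits8).flatten := by
  induction m generalizing l with
  | zero =>
      have : l = [] := List.eq_nil_of_length_eq_zero (by omega)
      subst this; simp [pvFromHex]
  | succ m ih =>
      obtain ⟨c, c', t, rfl⟩ : ∃ c c' t, l = c :: c' :: t := by
        match l, hl with
        | c :: c' :: t, _ => exact ⟨c, c', t, rfl⟩
      have ht : t.length = 2 * m := by simp only [List.length_cons] at hl; omega
      rw [List.range_succ, List.map_append, List.flatMap_append, pvFromHex_cons]
      have hshift :
          ((List.range m).map (fun (k : Nat) => (2 * (m + 1) : Int) - 2 - 2 * (k : Int))).flatMap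
              (pvNibPair (c :: c' :: t))
            = ((List.range m).map (fun (k : Nat) => (2 * m : Int) - 2 - 2 * (k : Int))).flatMap (pvNibPair t) := by
        rw [List.flatMap_map, List.flatMap_map]
        apply List.flatMap_congr
        intro k hk
        have hk' : k < m := List.mem_range.mp hk
        have h1 : ((2 * (m + 1) : Int) - 2 - 2 * k) = ((2 * m : Int) - 2 - 2 * k) + 2 := by
          ring
        rw [h1, pvNibPair_shift c c' t _ (by omega)]
      have hlast : pvNibPair (c :: c' :: t) ((2 * ((m : Int) + 1)) - 2 - 2 * m)
            = pvBits8 (16 * (pvHexDigit? c).getD 0 + (pvHexDigit? c').getD 0) := by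
        rw [show ((2 * ((m : Int) + 1)) - 2 - 2 * m) = 0 from by ring]
        exact pvNibPair_zero c c' t
      push_cast
      rw [hshift, ih t ht]
      simp only [List.map_cons, List.map_nil, List.flatMap_cons, List.flatMap_nil,
        List.append_nil]
      rw [hlast]
      simp

-- bridging pvLoop_core to A's literal loop
theorem pvLoop_eq (l : List Char) (hl : l.length % 2 = 0) :
    (PySem.List.pyRange ((l.length : Int) - 2) (-1) (-2)).foldl
      (fun acc i =>
        (acc ++ (pvBits8 ((pvHexDigit? (PySem.List.pyGetD l i '0')).getD 0)).drop 4)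
            ++ (pvBits8 ((pvHexDigit? (PySem.List.pyGetD l (i + 1) '0')).getD 0)).drop 4) []
      = ((pvFromHex l).reverse.map pvBits8).flatten := by
  obtain ⟨m, hm⟩ : ∃ m, l.length = 2 * m := ⟨l.length / 2, by omega⟩
  have h1 : ((l.length : Int) - 2) = ((2 * m : Int) - 2) := by rw [hm]; push_cast; ring
  rw [h1, pvRange_step2 m]
  have h2 := PySem.List.foldl_append_eq_flatMap
    (l := (List.range m).map (fun (k : Nat) => (2 * m : Int) - 2 - 2 * (k : Int)))
    (g := pvNibPair l) (acc := ([] : List Char))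
  simp only [pvNibPair] at h2
  simp only [List.append_assoc]
  rw [h2]
  simpa using pvLoop_core m l hm

-- ===== B-side lemmas: the numeric pipeline produces the same byte list and rendering =====

-- accumulator characterisation of the base-16 digit fold
theorem pvFold16_acc : ∀ (l : List Char) (a : Nat),
    l.foldl (fun a c => 16 * a + (pvHexDigit? c).getD 0) a
      = a * 16 ^ l.length + l.foldl (fun a c => 16 * a + (pvHexDigit? c).getD 0) 0
  | [], a => by simp
  | c :: t, a => by
      simp only [List.foldl_cons, List.length_cons]
      rw [pvFold16_acc t (16 * a + (pvHexDigit? c).getD 0),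
          pvFold16_acc t (16 * 0 + (pvHexDigit? c).getD 0), pow_succ]
      ring

theorem pvHexVal_acc (l : List Char) (a : Nat) :
    l.foldl (fun a c => 16 * a + (pvHexDigit? c).getD 0) a
      = a * 16 ^ l.length + pvHexVal l := pvFold16_acc l a

theorem pvHexVal_cons2 (c c' : Char) (t : List Char) :
    pvHexVal (c :: c' :: t)
      = (16 * (pvHexDigit? c).getD 0 + (pvHexDigit? c').getD 0) * 256 ^ (t.length / 2)
          * 16 ^ (t.length % 2) + pvHexVal t := by
  unfold pvHexVal
  simp only [List.foldl_cons]
  rw [pvHexVal_acc]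
  have h16 : (16 : Nat) ^ t.length = 256 ^ (t.length / 2) * 16 ^ (t.length % 2) := by
    conv_lhs => rw [show t.length = 2 * (t.length / 2) + t.length % 2 by omega]
    rw [pow_add, pow_mul]
    norm_num
  rw [h16]
  unfold pvHexVal
  ring

theorem pvHexVal_lt (l : List Char) : pvHexVal l < 16 ^ l.length := by
  induction l with
  | nil => simp [pvHexVal]
  | cons c t ih =>
      have hc := pvHexDigit?_lt c
      have h2 : pvHexVal (c :: t) = (pvHexDigit? c).getD 0 * 16 ^ t.length + pvHexVal t := by
        unfold pvHexVal
        simp only [List.foldl_cons]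
        rw [pvHexVal_acc]
        simp only [Nat.mul_zero, Nat.zero_add]
        rfl
      rw [h2, List.length_cons]
      have hle : (pvHexDigit? c).getD 0 * 16 ^ t.length ≤ 15 * 16 ^ t.length :=
        Nat.mul_le_mul_right _ (by omega)
      calc (pvHexDigit? c).getD 0 * 16 ^ t.length + pvHexVal t
          < (pvHexDigit? c).getD 0 * 16 ^ t.length + 16 ^ t.length := by omega
        _ ≤ 15 * 16 ^ t.length + 16 ^ t.length := by omega
        _ = 16 ^ (t.length + 1) := by ring

-- to_bytes peels the leading byte for values below 256^(m+1)
theorem pvToBytesBE_split (m : Nat) (b : Nat) (hb : b < 256) : ∀ r : Nat, r < 256 ^ m →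
    pvToBytesBE (m + 1) (b * 256 ^ m + r) = b :: pvToBytesBE m r := by
  induction m with
  | zero =>
      intro r hr
      have : r = 0 := by omega
      subst this
      simp [pvToBytesBE, Nat.mod_eq_of_lt hb]
  | succ m ih =>
      intro r hr
      have hdiv : (b * 256 ^ (m + 1) + r) / 256 = b * 256 ^ m + r / 256 := by
        rw [pow_succ, show b * (256 ^ m * 256) + r = (b * 256 ^ m) * 256 + r by ring]
        omega
      have hmod : (b * 256 ^ (m + 1) + r) % 256 = r % 256 := by
        rw [pow_succ, show b * (256 ^ m * 256) + r = (b * 256 ^ m) * 256 + r by ring]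
        omega
      rw [show m + 1 + 1 = (m + 1) + 1 from rfl]
      rw [pvToBytesBE, hdiv, hmod, ih (r / 256) (by rw [pow_succ] at hr; omega)]
      rw [pvToBytesBE]
      rfl

-- to_bytes of the parsed tail is exactly A's nibble pairing
theorem pvToBytes_fromHex_aux : ∀ (m : Nat) (l : List Char), l.length = 2 * m →
    pvToBytesBE m (pvHexVal l) = pvFromHex l := by
  intro m
  induction m with
  | zero =>
      intro l hm
      have : l = [] := List.eq_nil_of_length_eq_zero (by omega)
      subst this; rfl
  | succ m ih =>
      intro l hm
      obtain ⟨c, c', t, rfl⟩ : ∃ c c' t, l = c :: c' :: t := by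
        match l, hm with
        | c :: c' :: t, _ => exact ⟨c, c', t, rfl⟩
      have ht : t.length = 2 * m := by simp only [List.length_cons] at hm; omega
      rw [pvHexVal_cons2, pvFromHex_cons, ht,
          show 2 * m / 2 = m by omega, show 2 * m % 2 = 0 by omega, pow_zero, mul_one]
      have hb : 16 * (pvHexDigit? c).getD 0 + (pvHexDigit? c').getD 0 < 256 := by
        have := pvHexDigit?_lt c; have := pvHexDigit?_lt c'; omega
      have hr : pvHexVal t < 256 ^ m := by
        have h1 := pvHexVal_lt t
        rw [ht] at h1
        rwa [show (16 : Nat) ^ (2 * m) = 256 ^ m by rw [pow_mul]; norm_num] at h1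
      rw [pvToBytesBE_split m _ hb (pvHexVal t) hr, ih t ht]

theorem pvToBytes_fromHex (l : List Char) (hl : l.length % 2 = 0) :
    pvToBytesBE (l.length / 2) (pvHexVal l) = pvFromHex l :=
  pvToBytes_fromHex_aux (l.length / 2) l (by omega)

-- from_bytes with an accumulator
theorem pvFold256_acc : ∀ (bs : List Nat) (a : Nat),
    bs.foldl (fun a b => 256 * a + b) a
      = a * 256 ^ bs.length + bs.foldl (fun a b => 256 * a + b) 0
  | [], a => by simp
  | b :: t, a => by
      simp only [List.foldl_cons, List.length_cons]
      rw [pvFold256_acc t (256 * a + b), pvFold256_acc t (256 * 0 + b), pow_succ]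
      ring

theorem pvFromBytesBE_acc (bs : List Nat) (a : Nat) :
    bs.foldl (fun a b => 256 * a + b) a = a * 256 ^ bs.length + pvFromBytesBE bs :=
  pvFold256_acc bs a

theorem pvFromBytesBE_lt (bs : List Nat) (h : ∀ b ∈ bs, b < 256) :
    pvFromBytesBE bs < 256 ^ bs.length := by
  induction bs with
  | nil => simp [pvFromBytesBE]
  | cons b t ih =>
      have hb : b < 256 := h b (by simp)
      have ht := ih (fun x hx => h x (by simp [hx]))
      have h2 : pvFromBytesBE (b :: t) = b * 256 ^ t.length + pvFromBytesBE t := by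
        unfold pvFromBytesBE
        simp only [List.foldl_cons]
        rw [pvFromBytesBE_acc]
        simp only [Nat.mul_zero, Nat.zero_add]
        rfl
      rw [h2, List.length_cons]
      have hle : b * 256 ^ t.length ≤ 255 * 256 ^ t.length := Nat.mul_le_mul_right _ (by omega)
      calc b * 256 ^ t.length + pvFromBytesBE t
          < b * 256 ^ t.length + 256 ^ t.length := by omega
        _ ≤ 255 * 256 ^ t.length + 256 ^ t.length := by omega
        _ = 256 ^ (t.length + 1) := by ring

-- zero-padded binary splits along a power-of-two decomposition
theorem pvBin_split (w : Nat) : ∀ (k a r : Nat), r < 2 ^ k →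
    pvBin (w + k) (a * 2 ^ k + r) = pvBin w a ++ pvBin k r := by
  intro k
  induction k with
  | zero =>
      intro a r hr
      have : r = 0 := by omega
      subst this
      simp [pvBin]
  | succ k ih =>
      intro a r hr
      have hdiv : (a * 2 ^ (k + 1) + r) / 2 = a * 2 ^ k + r / 2 := by
        rw [pow_succ, show a * (2 ^ k * 2) + r = (a * 2 ^ k) * 2 + r by ring]
        omega
      have hmod : (a * 2 ^ (k + 1) + r) % 2 = r % 2 := by
        rw [pow_succ, show a * (2 ^ k * 2) + r = (a * 2 ^ k) * 2 + r by ring]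
        omega
      rw [show w + (k + 1) = (w + k) + 1 by ring]
      rw [pvBin, hdiv, hmod, ih a (r / 2) (by rw [pow_succ] at hr; omega)]
      rw [pvBin, List.append_assoc]

-- eight-wide rendering agrees with A's per-byte format
set_option maxRecDepth 4096 in
theorem pvBin8_eq_bits8 : ∀ b : Fin 256, pvBin 8 b = pvBits8 b := by decide

-- the rendering of the byte-reversed value is the concatenation of the per-byte renderings
theorem pvBin_bytes (bs : List Nat) (h : ∀ b ∈ bs, b < 256) :
    pvBin (8 * bs.length) (pvFromBytesBE bs) = (bs.map pvBits8).flatten := by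
  induction bs with
  | nil => simp [pvBin, pvFromBytesBE]
  | cons b t ih =>
      have hb : b < 256 := h b (by simp)
      have ht : ∀ x ∈ t, x < 256 := fun x hx => h x (by simp [hx])
      have hval : pvFromBytesBE (b :: t) = b * 256 ^ t.length + pvFromBytesBE t := by
        unfold pvFromBytesBE
        simp only [List.foldl_cons]
        rw [pvFromBytesBE_acc]
        simp only [Nat.mul_zero, Nat.zero_add]
        rfl
      have h256 : (256 : Nat) ^ t.length = 2 ^ (8 * t.length) := by
        rw [pow_mul]; norm_num
      rw [hval, List.length_cons, show 8 * (t.length + 1) = 8 + 8 * t.length by ring,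
          h256, pvBin_split 8 (8 * t.length) b (pvFromBytesBE t)
            (by rw [← h256]; exact pvFromBytesBE_lt t ht),
          ih ht, pvBin8_eq_bits8 ⟨b, hb⟩]
      rfl

theorem pvFromHex_length : ∀ l : List Char, (pvFromHex l).length = l.length / 2
  | [] => rfl
  | [c] => by simp [pvFromHex]
  | c :: c' :: t => by
      rw [pvFromHex_cons]
      simp only [List.length_cons]
      rw [pvFromHex_length t]
      omega

theorem pvFromHex_lt : ∀ l : List Char, ∀ b ∈ pvFromHex l, b < 256
  | [] => by intro b hb; simp [pvFromHex] at hb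
  | [c] => by intro b hb; simp [pvFromHex] at hb
  | c :: c' :: t => by
      intro b hb
      rw [pvFromHex_cons] at hb
      rcases List.mem_cons.mp hb with h | h
      · have := pvHexDigit?_lt c; have := pvHexDigit?_lt c'; omega
      · exact pvFromHex_lt t b h

-- '0'-padding does not change the parsed value
theorem pvHexVal_pad (l : List Char) : pvHexVal ('0' :: l) = pvHexVal l := by
  unfold pvHexVal
  simp only [List.foldl_cons]
  have h0 : (pvHexDigit? '0').getD 0 = 0 := by decide
  rw [h0]

-- ===== VERDICT (by name: the statement is the Claim_ definition above) =====
theorem displacement_finder_spec : Claim_equal_displacement_finder := by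
  intro disp _ _
  unfold Spec_displacement_finder displacement_finder displacement_finder_alt
  dsimp only
  -- the number_of_bits computations coincide
  rw [show (if (pvInt16? disp).getD 0 < 128 then (8:Int)
        else if (pvInt16? disp).getD 0 > 128 then 32 else (pvInt16? disp).getD 0)
      = pvWidth ((pvInt16? disp).getD 0) from rfl]
  -- split on the tail
  rcases hsplit : disp.toList.drop 2 with _ | ⟨c, t⟩
  · -- empty tail: A's padded list is empty and the loop range is empty
    simp only [List.length_nil]
    norm_num [PySem.List.pyRange]
    rfl
  · -- nonempty tail h = c :: t
    dsimp only
    set h : List Char := c :: t with hh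
    -- A's padded even-length list d, with d = pad h and hexval d = hexval h
    rw [show (if h.length % 2 ≠ 0 then '0' :: h else h)
        = (if h.length % 2 = 1 then '0' :: h else h) from by
      split_ifs with h1 h2 <;> first | rfl | omega]
    set d : List Char := (if h.length % 2 = 1 then '0' :: h else h) with hd
    have hev : d.length % 2 = 0 := by
      rw [hd]; split_ifs with hx
      · simp only [List.length_cons]; omega
      · omega
    have hn : d.length / 2 = (h.length + 1) / 2 := by
      rw [hd]; split_ifs with hx
      · simp only [List.length_cons]
      · omega
    have hvv : pvHexVal d = pvHexVal h := by
      rw [hd]; split_ifs with hx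
      · exact pvHexVal_pad h
      · rfl
    rw [pvLoop_eq d hev]
    -- B side: to_bytes gives pvFromHex d, reversal and rendering match
    rw [← hn, ← hvv, pvToBytes_fromHex d hev]
    have hlen : ((pvFromHex d).reverse).length = d.length / 2 := by
      rw [List.length_reverse, pvFromHex_length]
    rw [← hlen, pvBin_bytes ((pvFromHex d).reverse)
      (fun b hb => pvFromHex_lt d b (List.mem_reverse.mp hb))]
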